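-- pv_equiv track=rewrite | github.com/RomelSubia/CONTENT_ENGINE_OMEGA | 04_SCRIPTS/python/manual_brain_bridge/bridge_block_8_atomic_writer_lock_quarantine_recovery.py | choose_worst_status
-- ===== SOURCE A (Python) =====
-- from typing import Any, Mapping, Sequence
--
-- PASS = "PASS"
--
-- BLOCK = "BLOCK"
--
-- LOCK = "LOCK"
--
-- REVIEW = "REVIEW"
--
-- REVIEW_REQUIRED = "REVIEW_REQUIRED"
--
-- def choose_worst_status(statuses: Sequence[str]) -> str:
--     rank = {PASS: 0, REVIEW: 1, REVIEW_REQUIRED: 1, BLOCK: 2, LOCK: 3}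
--     worst = PASS
--     for status in statuses:
--         if status not in rank:
--             return LOCK
--         if rank[status] > rank[worst]:
--             worst = status
--     if worst == REVIEW:
--         return REVIEW_REQUIRED
--     return worst
-- ===== SOURCE B (Python) =====
-- PASS = "PASS"
-- BLOCK = "BLOCK"
-- LOCK = "LOCK"
-- REVIEW = "REVIEW"
-- REVIEW_REQUIRED = "REVIEW_REQUIRED"
--
-- def choose_worst_status(statuses):
--     known = (PASS, REVIEW, REVIEW_REQUIRED, BLOCK, LOCK)
--     if any(s not in known for s in statuses):
--         return LOCK
--     if LOCK in statuses:
--         return LOCK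
--     if BLOCK in statuses:
--         return BLOCK
--     if REVIEW in statuses or REVIEW_REQUIRED in statuses:
--         return REVIEW_REQUIRED
--     return PASS
-- ===== Notes on version B (the rewrite author's own statement) =====
-- stated objective: simpler
-- what changed: B drops the rank dict and the worst-so-far accumulator entirely: after a known-status guard it decides by a descending priority cascade of plain membership tests (LOCK in, BLOCK in, REVIEW/REVIEW_REQUIRED in), returning the canonical status directly.
import Mathlib
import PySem

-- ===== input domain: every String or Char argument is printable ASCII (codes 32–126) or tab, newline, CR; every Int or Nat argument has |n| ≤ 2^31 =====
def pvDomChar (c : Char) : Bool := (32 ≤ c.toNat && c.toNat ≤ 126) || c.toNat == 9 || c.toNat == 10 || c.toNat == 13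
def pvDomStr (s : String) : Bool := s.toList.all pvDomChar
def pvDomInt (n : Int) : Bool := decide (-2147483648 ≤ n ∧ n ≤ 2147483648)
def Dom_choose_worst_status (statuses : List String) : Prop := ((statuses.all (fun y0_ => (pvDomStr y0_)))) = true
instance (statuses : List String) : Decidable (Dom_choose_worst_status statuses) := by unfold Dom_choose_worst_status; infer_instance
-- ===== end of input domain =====

-- B drops A's rank dict and worst-so-far accumulator: a known-status guard followed by a
-- descending priority cascade of membership tests; objective: simpler.

-- ===== PORT A =====
def pvRankA : PySem.Dict String Int :=
  ((((PySem.Dict.empty.insert "PASS" 0).insert "REVIEW" 1).insert "REVIEW_REQUIRED" 1).insert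
      "BLOCK" 2).insert "LOCK" 3

-- the for-loop with its early return; the tail carries the post-loop REVIEW patch
def pvLoopA : List String → String → String
  | [], worst => if worst = "REVIEW" then "REVIEW_REQUIRED" else worst
  | s :: rest, worst =>
      if (pvRankA.get? s).isSome = false then "LOCK"
      else if pvRankA.getD worst 0 < pvRankA.getD s 0 then pvLoopA rest s
      else pvLoopA rest worst

def choose_worst_status (statuses : List String) : String :=
  pvLoopA statuses "PASS"

-- ===== PORT B =====
def pvKnownB : List String := ["PASS", "REVIEW", "REVIEW_REQUIRED", "BLOCK", "LOCK"]

def choose_worst_status_alt (statuses : List String) : String :=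
  if statuses.any (fun s => decide (s ∉ pvKnownB)) then "LOCK"
  else if "LOCK" ∈ statuses then "LOCK"
  else if "BLOCK" ∈ statuses then "BLOCK"
  else if "REVIEW" ∈ statuses ∨ "REVIEW_REQUIRED" ∈ statuses then "REVIEW_REQUIRED"
  else "PASS"

-- ===== PRECONDITION & SPEC =====
def Spec_choose_worst_status (statuses : List String) (out : String) : Prop := out = choose_worst_status_alt statuses
instance (statuses : List String) (out : String) : Decidable (Spec_choose_worst_status statuses out) := by unfold Spec_choose_worst_status; infer_instance

-- ===== CLAIM (what is proved, stated in full; the proofs are below) =====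
def Claim_equal_choose_worst_status : Prop := ∀ (statuses : List String), Dom_choose_worst_status statuses → Spec_choose_worst_status statuses (choose_worst_status statuses)

-- ===== LEMMAS AND PROOFS =====

-- reverse rank->canonical-status table, used only to state A's loop characterisation
def pvRevB : PySem.Dict Int String :=
  (((PySem.Dict.empty.insert 0 "PASS").insert 1 "REVIEW_REQUIRED").insert 2 "BLOCK").insert 3 "LOCK"

lemma pvRank_get (s : String) : pvRankA.get? s =
    if s = "LOCK" then some 3 else if s = "BLOCK" then some 2
    else if s = "REVIEW_REQUIRED" then some 1 else if s = "REVIEW" then some 1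
    else if s = "PASS" then some 0 else none := by
  simp [pvRankA, PySem.Dict.get?_insert, PySem.Dict.get?_empty]

lemma pvRank_known (s : String) :
    (pvRankA.get? s).isSome = true ↔
      s = "PASS" ∨ s = "REVIEW" ∨ s = "REVIEW_REQUIRED" ∨ s = "BLOCK" ∨ s = "LOCK" := by
  rw [pvRank_get]; split_ifs <;> simp_all

lemma pvRank_nonneg (s : String) : 0 ≤ pvRankA.getD s 0 := by
  rw [PySem.Dict.getD_eq_get?_getD, pvRank_get]; split_ifs <;> simp

lemma pvLoopA_eq (l : List String) : ∀ worst : String,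
    (worst = "PASS" ∨ worst = "REVIEW" ∨ worst = "REVIEW_REQUIRED" ∨ worst = "BLOCK" ∨ worst = "LOCK") →
    pvLoopA l worst =
      if l.any (fun s => (pvRankA.get? s).isSome = false) then "LOCK"
      else (pvRevB.get?
        (l.foldl (fun m s => max m (pvRankA.getD s 0)) (pvRankA.getD worst 0))).getD "" := by
  induction l with
  | nil =>
      intro worst hw
      rcases hw with rfl | rfl | rfl | rfl | rfl <;> decide
  | cons s rest ih =>
      intro worst hw
      by_cases hs : (pvRankA.get? s).isSome = true
      · have hs5 := (pvRank_known s).mp hs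
        simp only [pvLoopA, hs, List.any_cons, List.foldl_cons]
        by_cases hlt : pvRankA.getD worst 0 < pvRankA.getD s 0
        · rw [if_neg (by simp), if_pos hlt, ih s hs5,
            max_eq_right (le_of_lt hlt)]
          simp
        · rw [if_neg (by simp), if_neg hlt, ih worst hw,
            max_eq_left (le_of_not_gt hlt)]
          simp
      · have hs' : (pvRankA.get? s).isSome = false := by simpa using hs
        have hn : pvRankA.get? s = none := Option.not_isSome_iff_eq_none.mp (by simp [hs'])
        rw [pvLoopA, if_pos hs', if_pos (by simp [hn])]

-- pull the seed out of the max-fold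
lemma pvFold_seed (l : List String) : ∀ z : Int, 0 ≤ z →
    l.foldl (fun m s => max m (pvRankA.getD s 0)) z =
      max z (l.foldl (fun m s => max m (pvRankA.getD s 0)) 0) := by
  induction l with
  | nil => intro z hz; simpa using (max_eq_left hz).symm
  | cons s rest ih =>
      intro z hz
      simp only [List.foldl_cons]
      rw [ih (max z _) (le_max_of_le_left hz), ih (max 0 _) (le_max_left 0 _),
        max_eq_right (pvRank_nonneg s), max_assoc]

-- the max rank over an all-known list, as the descending cascade of membership tests
lemma pvFold_cascade (l : List String)
    (hk : l.any (fun s => (pvRankA.get? s).isSome = false) = false) :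
    l.foldl (fun m s => max m (pvRankA.getD s 0)) 0 =
      if "LOCK" ∈ l then 3 else if "BLOCK" ∈ l then 2
      else if "REVIEW" ∈ l ∨ "REVIEW_REQUIRED" ∈ l then 1 else 0 := by
  induction l with
  | nil => simp
  | cons s rest ih =>
      simp only [List.any_cons, Bool.or_eq_false_iff] at hk
      have hs5 := (pvRank_known s).mp (Option.isSome_iff_ne_none.mpr (by simpa using hk.1))
      have hrest := ih hk.2
      simp only [List.foldl_cons, List.mem_cons]
      rw [pvFold_seed rest _ (le_max_left 0 _), max_eq_right (pvRank_nonneg s), hrest]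
      rcases hs5 with rfl | rfl | rfl | rfl | rfl <;>
        rw [PySem.Dict.getD_eq_get?_getD, pvRank_get] <;>
          simp <;> split_ifs <;> simp_all

theorem choose_worst_status_spec_aux (statuses : List String) :
    choose_worst_status statuses = choose_worst_status_alt statuses := by
  rw [choose_worst_status, pvLoopA_eq statuses "PASS" (Or.inl rfl), choose_worst_status_alt]
  have hany : (statuses.any (fun s => decide (s ∉ pvKnownB)))
      = statuses.any (fun s => ((pvRankA.get? s).isSome = false : Bool)) := by
    congr 1; funext s
    by_cases h : (pvRankA.get? s).isSome = true
    · rcases (pvRank_known s).mp h with rfl | rfl | rfl | rfl | rfl <;> simp [pvKnownB, h]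
    · have h2 : ¬ (s = "PASS" ∨ s = "REVIEW" ∨ s = "REVIEW_REQUIRED" ∨ s = "BLOCK" ∨ s = "LOCK") :=
        fun hc => h ((pvRank_known s).mpr hc)
      push Not at h2
      simp only [pvKnownB, List.mem_cons, List.not_mem_nil]
      simp [h2.1, h2.2.1, h2.2.2.1, h2.2.2.2.1, h2.2.2.2.2]
      simpa using h
  rw [hany]
  by_cases hbad : statuses.any (fun s => ((pvRankA.get? s).isSome = false : Bool)) = true
  · rw [if_pos hbad, if_pos hbad]
  · have hk : statuses.any (fun s => ((pvRankA.get? s).isSome = false : Bool)) = false := by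
      simpa using hbad
    rw [if_neg hbad, if_neg hbad]
    have hp : pvRankA.getD "PASS" 0 = 0 := by decide
    rw [pvFold_seed statuses _ (le_of_eq hp.symm), hp, pvFold_cascade statuses hk]
    split_ifs <;> decide

-- ===== VERDICT (by name: the statement is the Claim_ definition above) =====
theorem choose_worst_status_spec : Claim_equal_choose_worst_status := by
  intro statuses _
  exact choose_worst_status_spec_aux statuses
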